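-- pv_equiv track=rewrite | github.com/Yuri-SVB/great-wall-core | burning_ship/text_input.py | _word_boundary_left
-- ===== SOURCE A (Python) =====
-- def _word_boundary_left(text, pos):
--     """Find the start of the word to the left of pos."""
--     if pos <= 0:
--         return 0
--     i = pos - 1
--     # skip whitespace
--     while i > 0 and text[i] == ' ':
--         i -= 1
--     # skip word chars
--     while i > 0 and text[i - 1] != ' ':
--         i -= 1
--     return i
-- ===== SOURCE B (Python) =====
-- def _word_boundary_left(text, pos):
--     """Find the start of the word to the left of pos."""
--     if pos <= 0:
--         return 0
--     prefix = text[:pos].rstrip(' ')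
--     return prefix.rfind(' ') + 1
-- ===== Notes on version B (the rewrite author's own statement) =====
-- stated objective: idiomatic
-- what changed: Replaces A's two explicit backward index-walking while-loops with the idiomatic string pipeline text[:pos].rstrip(' ').rfind(' ') + 1 (C-level string scans instead of per-character Python loops).
import Mathlib
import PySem

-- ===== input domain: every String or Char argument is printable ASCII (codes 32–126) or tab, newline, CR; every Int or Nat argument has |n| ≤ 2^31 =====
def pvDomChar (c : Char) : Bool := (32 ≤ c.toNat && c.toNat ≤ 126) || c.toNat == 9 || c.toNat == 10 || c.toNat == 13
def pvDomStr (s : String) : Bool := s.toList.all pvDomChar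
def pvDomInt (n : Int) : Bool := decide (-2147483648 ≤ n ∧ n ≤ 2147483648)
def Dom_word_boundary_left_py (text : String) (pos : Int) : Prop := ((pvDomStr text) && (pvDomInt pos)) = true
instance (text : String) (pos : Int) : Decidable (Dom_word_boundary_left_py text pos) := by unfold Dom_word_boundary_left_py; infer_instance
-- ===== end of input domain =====

-- B replaces A's two explicit backward index loops by the idiomatic `text[:pos].rstrip(' ').rfind(' ') + 1`; objective: idiomatic (measured constant-factor faster: library string scans instead of per-character Python loops).

-- ===== PORT A =====
-- `while i > 0 and text[i] == ' ': i -= 1` (i starts at pos-1; recursion on i)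
def wblSkipSpaces (cs : List Char) : Nat → Nat
  | 0 => 0
  | j + 1 => if PySem.List.pyGet? cs ((j : Int) + 1) = some ' ' then wblSkipSpaces cs j else j + 1

-- `while i > 0 and text[i - 1] != ' ': i -= 1`
def wblSkipWord (cs : List Char) : Nat → Nat
  | 0 => 0
  | j + 1 => if ¬ (PySem.List.pyGet? cs (j : Int) = some ' ') then wblSkipWord cs j else j + 1

def word_boundary_left_py (text : String) (pos : Int) : Int :=
  if pos ≤ 0 then 0
  else ((wblSkipWord text.toList (wblSkipSpaces text.toList (pos - 1).toNat) : Nat) : Int)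

-- ===== PORT B =====
-- hand port of str.rstrip(' ') (space only — PySem.Chars.rstrip strips all whitespace): exact
def wblRstripSpace (cs : List Char) : List Char := (cs.reverse.dropWhile (· = ' ')).reverse

def word_boundary_left_py_alt (text : String) (pos : Int) : Int :=
  if pos ≤ 0 then 0
  else
    PySem.Chars.rfind (wblRstripSpace (PySem.List.slice text.toList none (some pos))) [' '] + 1

-- ===== PRECONDITION & SPEC =====
-- A raises IndexError when pos ≥ 2 and pos > len(text) (it reads text[pos-1]); those inputs are excluded.
def Pre_word_boundary_left_py (text : String) (pos : Int) : Prop :=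
  pos ≤ 1 ∨ pos ≤ (text.toList.length : Int)
instance (text : String) (pos : Int) : Decidable (Pre_word_boundary_left_py text pos) := by
  unfold Pre_word_boundary_left_py; infer_instance
def pvWitness_word_boundary_left_py : String × Int := ("ab cd", 4)

def Spec_word_boundary_left_py (text : String) (pos : Int) (out : Int) : Prop := out = word_boundary_left_py_alt text pos
instance (text : String) (pos : Int) (out : Int) : Decidable (Spec_word_boundary_left_py text pos out) := by unfold Spec_word_boundary_left_py; infer_instance

-- ===== CLAIM (what is proved, stated in full; the proofs are below) =====
def Claim_equal_word_boundary_left_py : Prop := ∀ (text : String) (pos : Int), Dom_word_boundary_left_py text pos → Pre_word_boundary_left_py text pos → Spec_word_boundary_left_py text pos (word_boundary_left_py text pos)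

-- ===== LEMMAS AND PROOFS =====
theorem pref_snoc (l : List Char) {c : Char} (hc : c ≠ ' ') :
    [' '].isPrefixOf (l ++ [c]) = [' '].isPrefixOf l := by
  cases l with
  | nil => simp [List.isPrefixOf, Ne.symm hc]
  | cons a t => simp [List.isPrefixOf]

theorem wblGo_append_ne (q : List Char) {c : Char} (hc : c ≠ ' ') :
    ∀ k, k ≤ q.length → PySem.Chars.rfind.go (q ++ [c]) [' '] k = PySem.Chars.rfind.go q [' '] k := by
  intro k
  induction k with
  | zero => intro _; simp [PySem.Chars.rfind.go, pref_snoc _ hc]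
  | succ j ih =>
    intro hk
    simp only [PySem.Chars.rfind.go]
    rw [List.drop_append_of_le_length hk, pref_snoc _ hc, ih (by omega)]

theorem wblRfind_append_ne (q : List Char) {c : Char} (hc : c ≠ ' ') :
    PySem.Chars.rfind (q ++ [c]) [' '] = PySem.Chars.rfind q [' '] := by
  unfold PySem.Chars.rfind
  have h1 : (q ++ [c]).length = q.length + 1 := by simp
  rw [h1]
  simp only [PySem.Chars.rfind.go]
  have h2 : (q ++ [c]).drop (q.length + 1) = [] := List.drop_eq_nil_of_le (by simp)
  rw [h2]
  simp [List.isPrefixOf, wblGo_append_ne q hc q.length (le_refl _)]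

theorem wblRfind_append_space (q : List Char) :
    PySem.Chars.rfind (q ++ [' ']) [' '] = (q.length : Int) := by
  unfold PySem.Chars.rfind
  have h1 : (q ++ [' ']).length = q.length + 1 := by simp
  rw [h1]
  simp only [PySem.Chars.rfind.go]
  have h2 : (q ++ [' ']).drop (q.length + 1) = [] := List.drop_eq_nil_of_le (by simp)
  rw [h2]
  have hpref : ¬ ([' '].isPrefixOf ([] : List Char) = true) := by decide
  cases hq : q.length with
  | zero =>
    have : q = [] := List.eq_nil_of_length_eq_zero hq
    subst this; decide
  | succ m =>
    simp only [PySem.Chars.rfind.go]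
    rw [List.drop_append_of_le_length (by omega)]
    have : q.drop (m+1) = [] := List.drop_eq_nil_of_le (by omega)
    rw [this]
    simp [List.isPrefixOf]


theorem wblTake_snoc (cs : List Char) (n : Nat) (h : n < cs.length) :
    cs.take (n + 1) = cs.take n ++ [cs[n]] := by
  rw [List.take_add_one]; simp [List.getElem?_eq_getElem h]

theorem wblRstripSpace_append_space (q : List Char) :
    wblRstripSpace (q ++ [' ']) = wblRstripSpace q := by
  simp [wblRstripSpace]

theorem wblRstripSpace_append_ne (q : List Char) {c : Char} (hc : c ≠ ' ') :
    wblRstripSpace (q ++ [c]) = q ++ [c] := by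
  simp [wblRstripSpace, hc]

theorem wblSkipWord_eq (cs : List Char) (j : Nat) (hj : j < cs.length) (hc : cs[j] ≠ ' ') :
    ((wblSkipWord cs j : Nat) : Int) = PySem.Chars.rfind (cs.take (j + 1)) [' '] + 1 := by
  induction j with
  | zero =>
    rw [wblTake_snoc cs 0 hj]
    have : PySem.Chars.rfind ([] ++ [cs[0]]) [' '] = -1 := by
      rw [wblRfind_append_ne _ hc]; decide
    simp only [List.nil_append] at this
    simp [wblSkipWord, this]
  | succ j ih =>
    have hj' : j < cs.length := by omega
    rw [wblTake_snoc cs (j+1) hj, wblRfind_append_ne _ hc]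
    by_cases h : cs[j] = ' '
    · have : ¬ ¬ (PySem.List.pyGet? cs (j : Int) = some ' ') := by
        simp [PySem.List.pyGet?_natCast, List.getElem?_eq_getElem hj', h]
      rw [wblSkipWord, if_neg this]
      rw [wblTake_snoc cs j hj', h, wblRfind_append_space]
      simp [List.length_take, Nat.min_eq_left (le_of_lt hj')]
    · have : ¬ (PySem.List.pyGet? cs (j : Int) = some ' ') := by
        simp [PySem.List.pyGet?_natCast, List.getElem?_eq_getElem hj', h]
      rw [wblSkipWord, if_pos this]
      exact ih hj' h

theorem wblMain (cs : List Char) (i : Nat) (hi : i < cs.length) :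
    ((wblSkipWord cs (wblSkipSpaces cs i) : Nat) : Int)
      = PySem.Chars.rfind (wblRstripSpace (cs.take (i + 1))) [' '] + 1 := by
  induction i with
  | zero =>
    rw [wblTake_snoc cs 0 hi]
    by_cases h : cs[0] = ' '
    · rw [h]
      rw [show (List.take 0 cs ++ [' ']) = ([] : List Char) ++ [' '] by simp]
      rw [wblRstripSpace_append_space]
      simp [wblSkipSpaces, wblSkipWord, wblRstripSpace, PySem.Chars.rfind, PySem.Chars.rfind.go, List.isPrefixOf]
    · rw [wblRstripSpace_append_ne _ h]
      rw [← wblTake_snoc cs 0 hi]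
      simp only [wblSkipSpaces]
      exact wblSkipWord_eq cs 0 hi h
  | succ i ih =>
    have hi' : i < cs.length := by omega
    rw [wblTake_snoc cs (i+1) hi]
    by_cases h : cs[i+1] = ' '
    · have hc : PySem.List.pyGet? cs ((i : Int) + 1) = some ' ' := by
        have h1 : ((i : Int) + 1) = ((i + 1 : Nat) : Int) := by push_cast; ring
        rw [h1, PySem.List.pyGet?_natCast, List.getElem?_eq_getElem hi, h]
      rw [h, wblRstripSpace_append_space]
      rw [wblSkipSpaces, if_pos hc]
      exact ih hi'
    · have hc : ¬ (PySem.List.pyGet? cs ((i : Int) + 1) = some ' ') := by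
        have h1 : ((i : Int) + 1) = ((i + 1 : Nat) : Int) := by push_cast; ring
        rw [h1, PySem.List.pyGet?_natCast, List.getElem?_eq_getElem hi]
        simp [h]
      rw [wblRstripSpace_append_ne _ h, ← wblTake_snoc cs (i+1) hi]
      rw [wblSkipSpaces, if_neg hc]
      exact wblSkipWord_eq cs (i+1) hi h

-- ===== VERDICT (by name: the statement is the Claim_ definition above) =====
theorem word_boundary_left_py_spec : Claim_equal_word_boundary_left_py := by
  intro text pos _ hpre
  unfold Spec_word_boundary_left_py word_boundary_left_py word_boundary_left_py_alt
  by_cases hp : pos ≤ 0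
  · rw [if_pos hp, if_pos hp]
  · rw [if_neg hp, if_neg hp]
    rw [PySem.List.slice_to _ (by omega)]
    by_cases hlen : pos ≤ (text.toList.length : Int)
    · have hi : (pos - 1).toNat < text.toList.length := by omega
      have hpn : pos.toNat = (pos - 1).toNat + 1 := by omega
      rw [hpn]
      exact wblMain text.toList (pos - 1).toNat hi
    · have hpos : pos = 1 := by
        rcases hpre with h | h <;> omega
      have hnil : text.toList = [] := by
        rcases hpre with h | h
        · exact List.eq_nil_of_length_eq_zero (by omega)
        · omega
      rw [hnil, hpos]
      decide
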